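/-
  THE END THEOREM OF THE HEAP TOY, with every unit theorem plugged in: no hypothesis is left. Nothing is assumed about the program's
  own code; the heap's `malloc` and `free` come with the base's closed contracts (ProgX/Base/Closed.lean: machine proofs of the heap's
  eight functions, composed with the other 33 of the base).
-/
import Toyh.Final
import Toyh.Closed
import Toyh.Spec.Proved.start
namespace Toyh
open X86 X86.User Asan ProgX

/-- **The heap toy never trips the address sanitizer, and control never leaves its text window**: for every input of at most
1FF000H bytes, on every processor the proof covers, at ring 0 and at ring 3, the run of `X86.run` from the start machine of
c/toyh/toyh.bin reaches `prog_exit`; after every step before that RIP is inside `[100000H, 140000H)` and not at `__asan_report` —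
through `malloc`, the instrumented `memcpy` into the new object, and `free`. -/
theorem toyh_stays_in_code : ProgX.StaysInCode Toyh.image :=
  stays_in_code_of Closed.closed Spec.Proved.start_ok

/-- … hence it never reports. -/
theorem toyh_never_reports : ProgX.NeverReports Toyh.image :=
  toyh_stays_in_code.neverReports

end Toyh

#print axioms Toyh.toyh_stays_in_code
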